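-- pv_equiv track=rewrite | github.com/Githarold/2024ESWContest_free_1078 | circuit/rpi/send_commands.py | generate_lists
-- ===== SOURCE A (Python) =====
-- def generate_lists(step_input, linear_input):
--    values, indices = [], []
--    # 0이 아닌 원소와 그 인덱스를 저장
--    for i, val in enumerate(step_input):
--        if val != 0:
--            values.append(val)
--            indices.append(i)
--
--
--    # 값에 따라 오름차순 정렬
--    combined = sorted(zip(values, indices))
--    values, indices = zip(*combined) if combined else ([], [])
--
--
--    # disk_pre_rotation과 disk_rotation_list 생성
--    disk_pre_rotation = [index + 1 for index in indices]
--    disk_rotation_list = [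
--        disk_pre_rotation[i] - disk_pre_rotation[i - 1] if i > 0 else disk_pre_rotation[i] - 1
--        for i in range(len(disk_pre_rotation))
--    ]
--
--
--    # disk_rotation_list의 모든 항목의 합을 0으로 만드는 음수값 추가
--    total_sum = sum(disk_rotation_list)
--    disk_rotation_list.append(-total_sum)
--
--
--    # dispensor_activate_list 생성
--    dispensor_activate_list = [linear_input[index] for index in indices]
--
--
--    return disk_rotation_list, dispensor_activate_list
-- ===== SOURCE B (Python) =====
-- def generate_lists(step_input, linear_input):
--     remaining = {i: v for i, v in enumerate(step_input) if v != 0}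
--     disk_rotation_list, dispensor_activate_list = [], []
--     prev = 1
--     while remaining:
--         idx = min(remaining, key=lambda i: (remaining[i], i))
--         disk_rotation_list.append(idx + 1 - prev)
--         dispensor_activate_list.append(linear_input[idx])
--         prev = idx + 1
--         del remaining[idx]
--     disk_rotation_list.append(1 - prev)
--     return disk_rotation_list, dispensor_activate_list
-- ===== Notes on version B (the rewrite author's own statement) =====
-- stated objective: alternative
-- what changed: Replaces A's filter/zip/sorted-tuples/unzip pipeline with its index-difference comprehension and separate sum pass by a sort-free selection loop: the nonzero entries go into a dict keyed by index, and while it is nonempty the (value, index)-minimal key is extracted with min() and deleted, emitting both output elements on the spot; correct because repeated minimum extraction enumerates the entries in exactly sorted(zip(values, indices)) order (keys are distinct, so the order is strict) and the closing element 1 - prev equals the negated sum of the emitted differences.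
import Mathlib
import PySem

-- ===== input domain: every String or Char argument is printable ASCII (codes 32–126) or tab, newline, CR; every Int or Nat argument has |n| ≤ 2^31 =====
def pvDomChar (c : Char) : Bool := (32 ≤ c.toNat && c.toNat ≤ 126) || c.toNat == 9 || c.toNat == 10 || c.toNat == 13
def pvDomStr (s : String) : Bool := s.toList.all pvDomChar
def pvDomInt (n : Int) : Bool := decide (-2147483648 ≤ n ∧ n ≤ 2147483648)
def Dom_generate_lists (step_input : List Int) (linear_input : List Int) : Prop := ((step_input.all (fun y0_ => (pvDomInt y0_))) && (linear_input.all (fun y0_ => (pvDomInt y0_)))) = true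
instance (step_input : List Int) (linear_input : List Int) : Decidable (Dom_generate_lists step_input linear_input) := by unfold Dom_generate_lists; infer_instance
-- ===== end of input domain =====

-- B replaces A's filter/zip/sort/unzip/diff-comprehension/sum pipeline by a sort-free selection
-- loop: repeatedly extract the (value, index)-minimal remaining entry from a dict (objective: alternative).


-- ===== PORT A =====
def generate_lists (step_input : List Int) (linear_input : List Int) : List Int × List Int :=
  -- for i, val in enumerate(step_input): if val != 0: values.append(val); indices.append(i)
  let vi : List Int × List Int :=
    (PySem.List.enumerate step_input 0).foldl
      (fun acc p => if p.2 ≠ 0 then (acc.1 ++ [p.2], acc.2 ++ [p.1]) else acc) ([], [])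
  -- combined = sorted(zip(values, indices))   (Python tuple comparison = sorted2)
  let combined := PySem.List.sorted2 (vi.1.zip vi.2) (fun p => p.1) (fun p => p.2)
  -- values, indices = zip(*combined) if combined else ([], [])
  let _values : List Int := if combined = [] then [] else combined.map (fun p => p.1)
  let indices : List Int := if combined = [] then [] else combined.map (fun p => p.2)
  let disk_pre_rotation := indices.map (fun index => index + 1)
  -- i runs over range(len(disk_pre_rotation)), so indexing is always in range: pyGetD's default is never read
  let disk_rotation_list :=
    (PySem.List.pyRange 0 (disk_pre_rotation.length : Int)).map
      (fun i => if i > 0 then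
          PySem.List.pyGetD disk_pre_rotation i 0 - PySem.List.pyGetD disk_pre_rotation (i - 1) 0
        else PySem.List.pyGetD disk_pre_rotation i 0 - 1)
  let total_sum := disk_rotation_list.sum
  let disk_rotation_list := disk_rotation_list ++ [-total_sum]
  -- linear_input[index] raises IndexError when index ≥ len(linear_input): those inputs are excluded by Pre_
  let dispensor_activate_list := indices.map (fun index => PySem.List.pyGetD linear_input index 0)
  (disk_rotation_list, dispensor_activate_list)

-- ===== PORT B =====
-- min(remaining, key=lambda i: (remaining[i], i)): the dict's keys are distinct, so the key
-- tuple of a key i is exactly (p.2, p.1) for the item p with p.1 = i: min2? over the items.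
-- while remaining: idx = min(...); append; del remaining[idx] — the loop removes one item per
-- iteration, so fuel = the item count is exact; the fuel-0 branch is the loop's exit.
def pvSelLoop (lin : List Int) : Nat → List (Int × Int) → Int → List Int → List Int → List Int × List Int
  | 0, _rem, prev, rot, disp => (rot ++ [1 - prev], disp)
  | fuel + 1, rem, prev, rot, disp =>
    match PySem.List.min2? rem (fun p => p.2) (fun p => p.1) with
    | none => (rot ++ [1 - prev], disp)
    | some m =>
        -- del remaining[idx]: keys are distinct, so deleting the key removes exactly the item m
        pvSelLoop lin fuel (rem.erase m) (m.1 + 1)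
          (rot ++ [m.1 + 1 - prev]) (disp ++ [PySem.List.pyGetD lin m.1 0])

def generate_lists_alt (step_input : List Int) (linear_input : List Int) : List Int × List Int :=
  -- remaining = {i: v for i, v in enumerate(step_input) if v != 0} — its items, in insertion order
  let remaining := (PySem.List.enumerate step_input 0).filter (fun p => decide (p.2 ≠ 0))
  pvSelLoop linear_input remaining.length remaining 1 [] []

-- ===== PRECONDITION & SPEC =====
-- Pre_ excludes exactly the inputs where Python A raises IndexError: a nonzero entry of
-- step_input whose position is not a valid index of linear_input (B raises there too).
def Pre_generate_lists (step_input : List Int) (linear_input : List Int) : Prop :=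
  ∀ i : Nat, i < step_input.length → step_input.getD i 0 ≠ 0 → i < linear_input.length
instance (step_input : List Int) (linear_input : List Int) : Decidable (Pre_generate_lists step_input linear_input) := by unfold Pre_generate_lists; infer_instance
def pvWitness_generate_lists : List Int × List Int := ([2, 0, -3, 2], [5, 6, 7, 8])

def Spec_generate_lists (step_input : List Int) (linear_input : List Int) (out : List Int × List Int) : Prop := out = generate_lists_alt step_input linear_input
instance (step_input : List Int) (linear_input : List Int) (out : List Int × List Int) : Decidable (Spec_generate_lists step_input linear_input out) := by unfold Spec_generate_lists; infer_instance

-- ===== CLAIM (what is proved, stated in full; the proofs are below) =====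
def Claim_equal_generate_lists : Prop := ∀ (step_input : List Int) (linear_input : List Int), Dom_generate_lists step_input linear_input → Pre_generate_lists step_input linear_input → Spec_generate_lists step_input linear_input (generate_lists step_input linear_input)

-- ===== LEMMAS AND PROOFS =====

-- the "stable-tie" order: strictly smaller key, or equal key and original (= index) order
def pvW (key : Int → Int) (a b : Int) : Prop := key a < key b ∨ (key a = key b ∧ a < b)

-- B's selection key, as a linear order: the Python tuple (remaining[i], i)
def pvK (p : Int × Int) : Lex (Int × Int) := toLex (p.2, p.1)

theorem pv_insertBy_pairwise (key : Int → Int) (x : Int) :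
    ∀ acc : List Int, acc.Pairwise (pvW key) → (∀ a ∈ acc, a < x) →
      (PySem.List.insertBy (fun a b => decide (key a < key b)) x acc).Pairwise (pvW key) := by
  intro acc
  induction acc with
  | nil => intro _ _; simp [PySem.List.insertBy, pvW]
  | cons y ys ih =>
    intro hp hlt
    rw [List.pairwise_cons] at hp
    by_cases h : key x < key y
    · simp only [PySem.List.insertBy, h, decide_true]
      refine List.pairwise_cons.2 ⟨?_, List.pairwise_cons.2 ⟨hp.1, hp.2⟩⟩
      intro z hz
      rw [List.mem_cons] at hz
      rcases hz with hz | hz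
      · exact Or.inl (by simpa [hz] using h)
      · rcases hp.1 z hz with hk | hk
        · exact Or.inl (lt_trans h hk)
        · exact Or.inl (lt_of_lt_of_le h (le_of_eq hk.1))
    · simp only [PySem.List.insertBy, h, decide_false]
      refine List.pairwise_cons.2 ⟨?_, ih hp.2 (fun a ha => hlt a (List.mem_cons_of_mem _ ha))⟩
      intro z hz
      rcases (PySem.List.mem_insertBy _ _ _ _).1 hz with hz | hz
      · subst hz
        rcases lt_or_eq_of_le (not_lt.1 h) with hk | hk
        · exact Or.inl hk
        · exact Or.inr ⟨hk, hlt y (List.mem_cons_self)⟩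
      · exact hp.1 z hz

theorem pv_foldl_insertBy_pairwise (key : Int → Int) :
    ∀ (xs acc : List Int), acc.Pairwise (pvW key) → xs.Pairwise (· < ·) →
      (∀ a ∈ acc, ∀ x ∈ xs, a < x) →
      (xs.foldl (fun acc x => PySem.List.insertBy (fun a b => decide (key a < key b)) x acc) acc).Pairwise (pvW key) := by
  intro xs
  induction xs with
  | nil => intro acc h _ _; simpa using h
  | cons x t ih =>
    intro acc hacc hxs hsep
    rw [List.pairwise_cons] at hxs
    simp only [List.foldl_cons]
    apply ih
    · exact pv_insertBy_pairwise key x acc hacc (fun a ha => hsep a ha x List.mem_cons_self)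
    · exact hxs.2
    · intro a ha y hy
      rcases (PySem.List.mem_insertBy _ _ _ _).1 ha with ha | ha
      · subst ha; exact hxs.1 y hy
      · exact hsep a ha y (List.mem_cons_of_mem _ hy)

theorem pv_sorted_stable (key : Int → Int) (xs : List Int) (h : xs.Pairwise (· < ·)) :
    (PySem.List.sorted xs key).Pairwise (pvW key) := by
  rw [PySem.List.sorted_eq_foldl_insertBy]
  exact pv_foldl_insertBy_pairwise key xs [] (by simp) h (by simp)

theorem pv_sorted2_as_lex (xs : List (Int × Int)) :
    PySem.List.sorted2 xs (fun p => p.1) (fun p => p.2)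
      = PySem.List.sorted xs (fun p => (toLex (p.1, p.2) : Lex (Int × Int))) := by
  rw [PySem.List.sorted_eq_foldl_insertBy]
  show List.foldl _ [] xs = _
  have hbe : (fun (a b : Int × Int) => decide (a.1 < b.1) || (!decide (b.1 < a.1) && decide (a.2 < b.2)))
      = (fun (a b : Int × Int) => decide ((toLex (a.1, a.2) : Lex (Int × Int)) < toLex (b.1, b.2))) := by
    funext a b
    by_cases h1 : a.1 < b.1 <;> by_cases h2 : b.1 < a.1 <;> by_cases h3 : a.2 < b.2 <;>
      simp [Prod.Lex.lt_iff, h1, h2, h3] <;> omega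
  rw [hbe]
  simp

theorem pv_min2_eq_min? (xs : List (Int × Int)) :
    PySem.List.min2? xs (fun p => p.2) (fun p => p.1) = PySem.List.min? xs pvK := by
  unfold PySem.List.min2? PySem.List.min?
  congr 1
  funext acc x
  cases acc with
  | none => rfl
  | some m =>
    show (if (decide (x.2 < m.2) || !decide (m.2 < x.2) && decide (x.1 < m.1)) = true
          then some x else some m)
       = (if pvK x < pvK m then some x else some m)
    have hiff : ((decide (x.2 < m.2) || !decide (m.2 < x.2) && decide (x.1 < m.1)) = true)
        ↔ pvK x < pvK m := by
      simp only [pvK, Prod.Lex.lt_iff]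
      by_cases h1 : x.2 < m.2 <;> by_cases h2 : m.2 < x.2 <;> by_cases h3 : x.1 < m.1 <;>
        simp [h1, h2, h3] <;> omega
    by_cases h : pvK x < pvK m
    · rw [if_pos (hiff.2 h), if_pos h]
    · rw [if_neg (fun hc => h (hiff.1 hc)), if_neg h]

theorem pv_pvK_inj : Function.Injective pvK := by
  intro a b h
  simp only [pvK] at h
  have h' := congrArg (fun x : Lex (Int × Int) => ofLex x) h
  simp at h'
  exact Prod.ext h'.2 h'.1

-- extracting the minimum is taking the head of the sorted list
theorem pv_sorted_cons_min (rem : List (Int × Int)) (hnd : rem.Nodup) (m : Int × Int)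
    (hm : PySem.List.min? rem pvK = some m) :
    PySem.List.sorted rem pvK = m :: PySem.List.sorted (rem.erase m) pvK := by
  have hmem := PySem.List.min?_mem hm
  apply PySem.List.sorted_eq_of_perm_of_pairwise_lt
  · exact ((PySem.List.sorted_perm (rem.erase m) pvK false).cons m).trans
      (List.perm_cons_erase hmem).symm
  · refine List.pairwise_cons.2 ⟨?_, ?_⟩
    · intro y hy
      have hy' : y ∈ rem.erase m := (PySem.List.mem_sorted _ _ _ _).1 hy
      have hy2 := (hnd.mem_erase_iff.1 hy')
      have hle := PySem.List.min?_isMin hm y hy2.2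
      exact lt_of_le_of_ne hle (fun he => hy2.1 (pv_pvK_inj he).symm)
    · have hnd' : (PySem.List.sorted (rem.erase m) pvK false).Nodup :=
        ((PySem.List.sorted_perm (rem.erase m) pvK false).nodup_iff).2 (hnd.erase m)
      have hle := PySem.List.sorted_pairwise (rem.erase m) pvK
      exact (hle.and hnd').imp (fun h => lt_of_le_of_ne h.1 (fun he => h.2 (pv_pvK_inj he)))

-- B's loop, named: the successive-difference list and the final 'prev' over a sorted index list
def pvDiffs (prev : Int) : List Int → List Int
  | [] => []
  | i :: t => (i + 1 - prev) :: pvDiffs (i + 1) t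

def pvEnd (prev : Int) : List Int → Int
  | [] => prev
  | i :: t => pvEnd (i + 1) t

theorem pv_selLoop_eq (lin : List Int) :
    ∀ (fuel : Nat) (rem : List (Int × Int)), rem.length ≤ fuel → rem.Nodup →
      ∀ (prev : Int) (rot disp : List Int),
        pvSelLoop lin fuel rem prev rot disp
          = (rot ++ pvDiffs prev ((PySem.List.sorted rem pvK).map (fun p => p.1))
                 ++ [1 - pvEnd prev ((PySem.List.sorted rem pvK).map (fun p => p.1))],
             disp ++ ((PySem.List.sorted rem pvK).map (fun p => p.1)).map
                 (fun i => PySem.List.pyGetD lin i 0)) := by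
  have hnil : PySem.List.sorted ([] : List (Int × Int)) pvK = [] := rfl
  intro fuel
  induction fuel with
  | zero =>
    intro rem hlen _ prev rot disp
    have : rem = [] := List.length_eq_zero_iff.1 (Nat.le_zero.1 hlen)
    subst this
    rw [hnil]
    simp [pvSelLoop, pvDiffs, pvEnd]
  | succ n ih =>
    intro rem hlen hnd prev rot disp
    cases hm : PySem.List.min? rem pvK with
    | none =>
      have : rem = [] := (PySem.List.min?_eq_none_iff rem pvK).1 hm
      subst this
      rw [hnil]
      simp [pvSelLoop, pvDiffs, pvEnd, PySem.List.min2?]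
    | some m =>
      have hmem := PySem.List.min?_mem hm
      have hsort := pv_sorted_cons_min rem hnd m hm
      have hlen' : (rem.erase m).length ≤ n := by
        rw [List.length_erase_of_mem hmem]
        omega
      rw [pvSelLoop, pv_min2_eq_min?, hm]
      dsimp only
      rw [ih (rem.erase m) hlen' (hnd.erase m) (m.1 + 1)]
      rw [hsort]
      simp [pvDiffs, pvEnd]

theorem pv_diffs_length (prev : Int) (S : List Int) : (pvDiffs prev S).length = S.length := by
  induction S generalizing prev with
  | nil => rfl
  | cons i t ih => simp [pvDiffs, ih]

theorem pv_diffs_getElem (S : List Int) :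
    ∀ (prev : Int) (k : Nat) (h : k < S.length),
      (pvDiffs prev S)[k]'(by rw [pv_diffs_length]; exact h)
        = S[k] + 1 - (if hk : k = 0 then prev else S[k - 1]'(by omega) + 1) := by
  induction S with
  | nil => intro _ k h; simp at h
  | cons i t ih =>
    intro prev k h
    cases k with
    | zero => simp [pvDiffs]
    | succ n =>
      have h' : n < t.length := by simpa using h
      have := ih (i + 1) n h'
      cases n with
      | zero =>
        simp [pvDiffs] at this ⊢
        exact this
      | succ m =>
        simp [pvDiffs] at this ⊢
        exact this

theorem pv_diffs_sum (S : List Int) : ∀ prev : Int, (pvDiffs prev S).sum = pvEnd prev S - prev := by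
  induction S with
  | nil => intro prev; simp [pvDiffs, pvEnd]
  | cons i t ih => intro prev; simp [pvDiffs, pvEnd, ih (i + 1)]; try ring

-- ===== VERDICT (by name: the statement is the Claim_ definition above) =====
theorem generate_lists_spec : Claim_equal_generate_lists := by
  intro step lin _ _
  unfold Spec_generate_lists generate_lists generate_lists_alt
  have hvi : (PySem.List.enumerate step 0).foldl
      (fun acc p => if p.2 ≠ 0 then (acc.1 ++ [p.2], acc.2 ++ [p.1]) else acc)
      (([] : List Int), ([] : List Int))
      = (((PySem.List.enumerate step 0).filter (fun p => decide (p.2 ≠ 0))).map (fun p => p.2),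
         ((PySem.List.enumerate step 0).filter (fun p => decide (p.2 ≠ 0))).map (fun p => p.1)) := by
    have h1 : (fun (acc : List Int × List Int) (p : Int × Int) =>
        if p.2 ≠ 0 then (acc.1 ++ [p.2], acc.2 ++ [p.1]) else acc)
        = fun acc p => ((if p.2 ≠ 0 then acc.1 ++ [p.2] else acc.1),
                        (if p.2 ≠ 0 then acc.2 ++ [p.1] else acc.2)) := by
      funext acc p; split_ifs <;> rfl
    rw [h1, PySem.List.foldl_prod_mk
        (f := fun (a : List Int) (p : Int × Int) => if p.2 ≠ 0 then a ++ [p.2] else a)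
        (g := fun (a : List Int) (p : Int × Int) => if p.2 ≠ 0 then a ++ [p.1] else a),
      PySem.List.foldl_append_ite (p := fun (p : Int × Int) => p.2 ≠ 0) (f := fun p => p.2),
      PySem.List.foldl_append_ite (p := fun (p : Int × Int) => p.2 ≠ 0) (f := fun p => p.1)]
    simp
  rw [hvi]
  dsimp only
  set key := fun i : Int => PySem.List.pyGetD step i 0 with hkey
  set F := (PySem.List.enumerate step 0).filter (fun p => decide (p.2 ≠ 0)) with hF
  set idxs := F.map (fun p => p.1) with hidxs
  set S := PySem.List.sorted idxs key with hSdef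
  -- the values paired with their indices are (key i, i) over idxs
  have hFval : ∀ p ∈ F, key p.1 = p.2 := by
    intro p hp
    have hpE : p ∈ PySem.List.enumerate step 0 := List.mem_of_mem_filter hp
    obtain ⟨k, hk, rfl⟩ := (PySem.List.mem_enumerate_iff step 0 p).1 hpE
    simp [hkey, PySem.List.pyGetD_natCast, List.getD_eq_getElem?_getD, hk]
  have hpair : F.map (fun p => (p.2, p.1)) = idxs.map (fun i => (key i, i)) := by
    rw [hidxs, List.map_map]
    apply List.map_congr_left
    intro p hp
    simp [hFval p hp]
  have hFg : idxs.map (fun i => (i, key i)) = F := by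
    rw [hidxs, List.map_map]
    calc F.map (fun p => (p.1, key p.1)) = F.map id := by
          apply List.map_congr_left
          intro p hp
          simp [hFval p hp]
      _ = F := List.map_id F
  have hidxlt : idxs.Pairwise (· < ·) := by
    rw [hidxs, hF]
    exact ((PySem.List.pairwise_lt_enumerate step 0).filter _).map _ (fun a b h => h)
  have hFnd : F.Nodup := by
    have hFlt : F.Pairwise (fun a b : Int × Int => a.1 < b.1) := by
      rw [hF]
      exact (PySem.List.pairwise_lt_enumerate step 0).filter _
    exact hFlt.imp (fun h => by intro he; rw [he] at h; omega)
  have hperm : S.Perm idxs := PySem.List.sorted_perm idxs key false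
  have hW : S.Pairwise (pvW key) := pv_sorted_stable key idxs hidxlt
  have hcomb : PySem.List.sorted2 ((F.map (fun p => p.2)).zip (F.map (fun p => p.1)))
      (fun p => p.1) (fun p => p.2) = S.map (fun i => (key i, i)) := by
    rw [List.zip_map', hpair, pv_sorted2_as_lex]
    apply PySem.List.sorted_eq_of_perm_of_pairwise_lt
    · exact hperm.map _
    · apply List.Pairwise.map _ ?_ hW
      intro a b hab
      simp only []
      rw [Prod.Lex.lt_iff]
      rcases hab with h | ⟨h1, h2⟩
      · exact Or.inl h
      · exact Or.inr ⟨h1, h2⟩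
  -- B: the selection loop walks S
  have hsortF : PySem.List.sorted F pvK = S.map (fun i => (i, key i)) := by
    apply PySem.List.sorted_eq_of_perm_of_pairwise_lt
    · exact (hperm.map _).trans (hFg ▸ List.Perm.refl _)
    · apply List.Pairwise.map _ ?_ hW
      intro a b hab
      simp only [pvK]
      rw [Prod.Lex.lt_iff]
      rcases hab with h | ⟨h1, h2⟩
      · exact Or.inl h
      · exact Or.inr ⟨h1, h2⟩
  have hSsel : (PySem.List.sorted F pvK).map (fun p => p.1) = S := by
    rw [hsortF, List.map_map]
    simp [Function.comp_def]
  rw [pv_selLoop_eq lin F.length F le_rfl hFnd 1, hSsel]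
  rw [hcomb]
  have hind : (if S.map (fun i => (key i, i)) = [] then ([] : List Int)
      else (S.map (fun i => (key i, i))).map (fun p => p.2)) = S := by
    cases S with
    | nil => simp
    | cons a t => simp [Function.comp_def]
  rw [hind]
  have hget : ∀ (k : Nat) (hk : k < S.length),
      PySem.List.pyGetD (S.map (fun index => index + 1)) (k : Int) 0
        = S[k]'hk + 1 := by
    intro k hk
    rw [PySem.List.pyGetD_natCast]
    simp [List.getD_eq_getElem?_getD, hk]
  have hrot : (PySem.List.pyRange 0 ((S.map (fun index => index + 1)).length : Int)).map
      (fun i => if i > 0 then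
          PySem.List.pyGetD (S.map (fun index => index + 1)) i 0 -
            PySem.List.pyGetD (S.map (fun index => index + 1)) (i - 1) 0
        else PySem.List.pyGetD (S.map (fun index => index + 1)) i 0 - 1)
      = pvDiffs 1 S := by
    rw [List.length_map, PySem.List.pyRange_zero_natCast, List.map_map]
    apply List.ext_getElem
    · simp [pv_diffs_length]
    · intro k h1 h2
      have hk : k < S.length := by simpa using h1
      simp only [List.getElem_map, List.getElem_range, Function.comp_apply]
      rw [pv_diffs_getElem S 1 k hk]
      by_cases h0 : k = 0
      · subst h0
        rw [if_neg (by omega), hget 0 hk]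
        simp
      · rw [if_pos (by omega)]
        have hc : ((k : Int) - 1) = ((k - 1 : Nat) : Int) := by omega
        rw [hc, hget k hk, hget (k - 1) (by omega)]
        simp [h0]
  rw [hrot, pv_diffs_sum S 1]
  have hlast : -(pvEnd 1 S - 1) = 1 - pvEnd 1 S := by ring
  rw [hlast]
  simp
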